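-- pv_equiv track=rewrite | github.com/razevortex/PrinterWatch_v3 | Packages/SubPkg/Brother.py | pop_empty_fields
-- ===== SOURCE A (Python) =====
-- def pop_empty_fields(table):
--     pop = []
--     for i in range(len(table)):
--         if table[i] == '':
--             pop.append(i)
--         pop = pop[::-1]
--     if pop:
--         for i in pop:
--             table.pop(i)
--     return table
-- ===== SOURCE B (Python) =====
-- def pop_empty_fields(table):
--     table[:] = [field for field in table if field != '']
--     return table
-- ===== Notes on version B (the rewrite author's own statement) =====
-- stated objective: simpler
-- what changed: B removes the empty fields with a single in-place filtering comprehension instead of A's collect-indices loop that reverses the pending index list on every iteration and then pops by stale indices.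
-- intended difference: On tables where more than one empty field lies in the parity class A pops by ascending stale indices (even indices for even-length tables, odd for odd-length), or where such a field has an empty field of the other parity before it, A pops wrong cells and returns a list that keeps empty fields and/or loses non-empty ones (e.g. ['','','x'] -> ['']), while B returns the table with exactly the empty fields removed (['x']), the function's evident purpose. — e.g. on pop_empty_fields(["", "", "x"]): A returns [""], B returns ["x"]
import Mathlib
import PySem

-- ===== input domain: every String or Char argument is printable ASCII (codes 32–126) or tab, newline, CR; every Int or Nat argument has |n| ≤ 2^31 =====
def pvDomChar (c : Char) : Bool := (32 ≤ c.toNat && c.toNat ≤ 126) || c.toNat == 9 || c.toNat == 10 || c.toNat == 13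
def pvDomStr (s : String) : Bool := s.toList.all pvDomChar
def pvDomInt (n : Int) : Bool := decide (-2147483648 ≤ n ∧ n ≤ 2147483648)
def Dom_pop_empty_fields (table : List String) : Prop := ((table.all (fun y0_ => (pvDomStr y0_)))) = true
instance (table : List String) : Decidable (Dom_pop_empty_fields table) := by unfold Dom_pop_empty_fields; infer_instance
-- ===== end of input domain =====

-- B removes the empty fields with one in-place filtering comprehension (objective: simpler);
-- like A it mutates `table` in place in Python, and the equivalence proved is about the return value.

-- ===== PORT A =====
def pop_empty_fields (table : List String) : List String :=
  let pop : List Int := (PySem.List.pyRange 0 (table.length : Int) 1).foldl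
    (fun pop i =>
      -- table[i] with i drawn from range(len(table)) is always in range
      let pop := if (PySem.List.pyGetD table i "") == "" then pop ++ [i] else pop
      pop.reverse) []
  let res : Option (List String) :=
    if pop ≠ [] then
      pop.foldl (fun acc i => acc.bind (fun t => (PySem.List.pop? t i).map (·.2))) (some table)
    else some table
  res.getD []   -- none ⇔ Python raised IndexError (excluded by Pre_)

-- ===== PORT B =====
def pop_empty_fields_alt (table : List String) : List String :=
  table.filter (fun field => field != "")

-- ===== PRECONDITION & SPEC =====
-- Order in which A pops indices: odd-position empties reversed / even-position empties,
-- glued according to the parity of the length (helpers for Pre_/D_ only; they do not use the ports).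
def pvPopL (table : List String) (k : Nat) : List Int :=
  ((List.range k).filter (fun j => decide (table.getD j "" = "") && decide (j % 2 = 1))).map (fun j => Int.ofNat j)
def pvPopR (table : List String) (k : Nat) : List Int :=
  ((List.range k).filter (fun j => decide (table.getD j "" = "") && decide (j % 2 = 0))).map (fun j => Int.ofNat j)
def pvPopOrder (table : List String) : List Int :=
  if table.length % 2 = 0
  then (pvPopL table table.length).reverse ++ pvPopR table table.length
  else (pvPopR table table.length).reverse ++ pvPopL table table.length

-- Pre_ excludes exactly the inputs on which Python A raises IndexError in its pop loop:
-- the j-th popped index must be in range of the j-times-shortened list.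
def Pre_pop_empty_fields (table : List String) : Prop :=
  ∀ p ∈ (pvPopOrder table).zipIdx, p.1 + (p.2 : Int) < (table.length : Int)
instance (table : List String) : Decidable (Pre_pop_empty_fields table) := by
  unfold Pre_pop_empty_fields; infer_instance

def pvWitness_pop_empty_fields : List String := ["a", "", "b"]

-- Indices of the empty fields, and their split into the parity class A pops by descending
-- (always removing the right cells) and the class it pops by stale ascending indices.
def pvE (table : List String) : List Nat :=
  (List.range table.length).filter (fun j => decide (table.getD j "" = ""))
def pvPhase1 (table : List String) : List Nat :=
  (pvE table).filter (fun j => if table.length % 2 = 0 then j % 2 == 1 else j % 2 == 0)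
def pvPhase2 (table : List String) : List Nat :=
  (pvE table).filter (fun j => if table.length % 2 = 0 then j % 2 == 0 else j % 2 == 1)

-- On tables where more than one empty field lies in the ascending-popped parity class, or such a
-- field has an empty field of the other parity before it, A pops stale indices and returns a list
-- that keeps empty fields and/or loses non-empty ones (e.g. ["","","x"] ↦ [""]); B returns the
-- table with exactly the empty fields removed (["x"]), the function's evident purpose.
def D_pop_empty_fields (table : List String) : Prop :=
  2 ≤ (pvPhase2 table).length ∨ ∃ s ∈ pvPhase2 table, ∃ p ∈ pvPhase1 table, p < s
instance (table : List String) : Decidable (D_pop_empty_fields table) := by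
  unfold D_pop_empty_fields; infer_instance

def Spec_pop_empty_fields (table : List String) (out : List String) : Prop :=
  ¬ D_pop_empty_fields table → out = pop_empty_fields_alt table
instance (table : List String) (out : List String) : Decidable (Spec_pop_empty_fields table out) := by
  unfold Spec_pop_empty_fields; infer_instance

def pvDiffWitness_pop_empty_fields : List String := ["", "", "x"]
def pvDiffWitnessOut_pop_empty_fields : (List String) × (List String) := ([""], ["x"])

-- ===== CLAIM =====
def Claim_unchanged_pop_empty_fields : Prop :=
  ∀ (table : List String), Dom_pop_empty_fields table → Pre_pop_empty_fields table →
    Spec_pop_empty_fields table (pop_empty_fields table)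
def Claim_changed_pop_empty_fields : Prop :=
  Dom_pop_empty_fields (pvDiffWitness_pop_empty_fields) ∧
  Pre_pop_empty_fields (pvDiffWitness_pop_empty_fields) ∧
  D_pop_empty_fields (pvDiffWitness_pop_empty_fields) ∧
  pop_empty_fields (pvDiffWitness_pop_empty_fields) = pvDiffWitnessOut_pop_empty_fields.1 ∧
  pop_empty_fields_alt (pvDiffWitness_pop_empty_fields) = pvDiffWitnessOut_pop_empty_fields.2 ∧
  pvDiffWitnessOut_pop_empty_fields.1 ≠ pvDiffWitnessOut_pop_empty_fields.2

-- ===== LEMMAS AND PROOFS =====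

theorem pvPopL_succ (table : List String) (k : Nat) :
    pvPopL table (k + 1) =
      pvPopL table k ++ (if table[k]?.getD "" = "" ∧ k % 2 = 1 then [(k : Int)] else []) := by
  unfold pvPopL
  by_cases he : table[k]?.getD "" = "" <;> by_cases hp : k % 2 = 1 <;>
    simp [List.range_succ, List.filter_append, List.filter, List.getD, he, hp]

theorem pvPopR_succ (table : List String) (k : Nat) :
    pvPopR table (k + 1) =
      pvPopR table k ++ (if table[k]?.getD "" = "" ∧ k % 2 = 0 then [(k : Int)] else []) := by
  unfold pvPopR
  by_cases he : table[k]?.getD "" = "" <;> by_cases hp : k % 2 = 0 <;>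
    simp [List.range_succ, List.filter_append, List.filter, List.getD, he, hp]

-- A's index-collecting loop over range(k): closed description by parity of k.
theorem aloop_eq (table : List String) (k : Nat) :
    (PySem.List.pyRange 0 (k : Int) 1).foldl
      (fun pop i =>
        let pop := if (PySem.List.pyGetD table i "") == "" then pop ++ [i] else pop
        pop.reverse) [] =
    if k % 2 = 0 then (pvPopL table k).reverse ++ pvPopR table k
    else (pvPopR table k).reverse ++ pvPopL table k := by
  induction k with
  | zero => simp [pvPopL, pvPopR, PySem.List.pyRange_one_eq_nil]
  | succ k ih =>
    have hcast : ((k + 1 : Nat) : Int) = (k : Int) + 1 := by push_cast; ring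
    rw [hcast, PySem.List.pyRange_one_succ_right (by positivity), List.foldl_append,
      ih, List.foldl_cons, List.foldl_nil]
    have hg : PySem.List.pyGetD table (k : Int) "" = table[k]?.getD "" := by
      simp [PySem.List.pyGetD_natCast, List.getD]
    rw [pvPopL_succ, pvPopR_succ]
    simp only [hg]
    by_cases he : table[k]?.getD "" = "" <;> by_cases hp : k % 2 = 0
    · have h1 : ¬ (k + 1) % 2 = 0 := by omega
      have h2 : ¬ k % 2 = 1 := by omega
      simp [he, hp, h1]
    · have h1 : (k + 1) % 2 = 0 := by omega
      have h2 : k % 2 = 1 := by omega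
      simp [he, h1, h2]
    · have h1 : ¬ (k + 1) % 2 = 0 := by omega
      have h2 : ¬ k % 2 = 1 := by omega
      simp [he, hp, h1]
    · have h1 : (k + 1) % 2 = 0 := by omega
      have h2 : k % 2 = 1 := by omega
      simp [he, h1, h2]

theorem pvPopL_eq (table : List String) :
    pvPopL table table.length =
      ((pvE table).filter (fun j => j % 2 == 1)).map (fun j => Int.ofNat j) := by
  unfold pvPopL pvE
  have h : List.filter (fun j => decide (table.getD j "" = "") && decide (j % 2 = 1))
        (List.range table.length) =
      List.filter (fun j => j % 2 == 1)
        (List.filter (fun j => decide (table.getD j "" = "")) (List.range table.length)) := by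
    rw [List.filter_filter]
    apply List.filter_congr
    intro a _
    cases h1 : decide (table.getD a "" = "") <;> cases h2 : decide (a % 2 = 1) <;> simp_all
  rw [h]

theorem pvPopR_eq (table : List String) :
    pvPopR table table.length =
      ((pvE table).filter (fun j => j % 2 == 0)).map (fun j => Int.ofNat j) := by
  unfold pvPopR pvE
  have h : List.filter (fun j => decide (table.getD j "" = "") && decide (j % 2 = 0))
        (List.range table.length) =
      List.filter (fun j => j % 2 == 0)
        (List.filter (fun j => decide (table.getD j "" = "")) (List.range table.length)) := by
    rw [List.filter_filter]
    apply List.filter_congr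
    intro a _
    cases h1 : decide (table.getD a "" = "") <;> cases h2 : decide (a % 2 = 0) <;> simp_all
  rw [h]

-- Popping a strictly descending list of in-range indices ignores a trailing fixed element.
theorem pop_fold_append_last (ds : List Nat) (t : List String) (a : String)
    (hs : ds.Pairwise (· > ·)) (hb : ∀ d ∈ ds, d < t.length) :
    ((ds.map (fun d => Int.ofNat d)).foldl
        (fun acc i => acc.bind (fun l => (PySem.List.pop? l i).map (·.2))) (some (t ++ [a]))) =
      ((ds.map (fun d => Int.ofNat d)).foldl
        (fun acc i => acc.bind (fun l => (PySem.List.pop? l i).map (·.2))) (some t)).map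
        (fun l => l ++ [a]) := by
  induction ds generalizing t with
  | nil => simp
  | cons d ds ih =>
    have hd : d < t.length := hb d (by simp)
    have hd' : d < (t ++ [a]).length := by simp; omega
    have h1 : PySem.List.pop? (t ++ [a]) (Int.ofNat d) =
        some ((t ++ [a])[d], (t ++ [a]).eraseIdx d) := by
      rw [Int.ofNat_eq_natCast]; exact PySem.List.pop?_natCast _ d hd'
    have h2 : PySem.List.pop? t (Int.ofNat d) = some (t[d], t.eraseIdx d) := by
      rw [Int.ofNat_eq_natCast]; exact PySem.List.pop?_natCast t d hd
    have he : (t ++ [a]).eraseIdx d = t.eraseIdx d ++ [a] :=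
      List.eraseIdx_append_of_lt_length hd [a]
    simp only [List.map_cons, List.foldl_cons, Option.bind_some, h1, h2, Option.map_some, he]
    exact ih (t.eraseIdx d) (List.Pairwise.of_cons hs) (fun e hee => by
      have h4 : d > e := (List.pairwise_cons.1 hs).1 e hee
      have h5 : (t.eraseIdx d).length = t.length - 1 := by
        rw [List.length_eraseIdx_of_lt hd]
      omega)

-- Popping exactly the empty positions, by strictly descending in-range indices, is the filter.
theorem pop_fold_desc_filter (t : List String) (ds : List Nat)
    (hs : ds.Pairwise (· > ·)) (hb : ∀ d ∈ ds, d < t.length)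
    (hiff : ∀ i, i < t.length → ((t.getD i "" = "") ↔ i ∈ ds)) :
    ((ds.map (fun d => Int.ofNat d)).foldl
        (fun acc i => acc.bind (fun l => (PySem.List.pop? l i).map (·.2))) (some t)) =
      some (t.filter (fun s => s != "")) := by
  induction t using List.reverseRecOn generalizing ds with
  | nil =>
    have : ds = [] := by
      cases ds with
      | nil => rfl
      | cons d ds => exact absurd (hb d (by simp)) (by simp)
    subst this; simp
  | append_singleton t' a ih =>
    have hget : (t' ++ [a]).getD t'.length "" = a := by
      simp [List.getD]
    by_cases ha : a = ""
    · have hmem : t'.length ∈ ds := (hiff t'.length (by simp)).1 (by rw [hget]; exact ha)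
      obtain ⟨ds', rfl⟩ : ∃ ds', ds = t'.length :: ds' := by
        cases ds with
        | nil => simp at hmem
        | cons d ds' =>
          rcases List.mem_cons.1 hmem with h | h
          · exact ⟨ds', by rw [h]⟩
          · have hgt : d > t'.length := (List.pairwise_cons.1 hs).1 _ h
            have hlt : d < (t' ++ [a]).length := hb d (by simp)
            simp at hlt; omega
      have h1 : PySem.List.pop? (t' ++ [a]) (Int.ofNat t'.length) =
          some ((t' ++ [a])[t'.length], (t' ++ [a]).eraseIdx t'.length) := by
        rw [Int.ofNat_eq_natCast]; exact PySem.List.pop?_natCast _ t'.length (by simp)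
      have he : (t' ++ [a]).eraseIdx t'.length = t' := by
        rw [List.eraseIdx_append_of_length_le (le_refl _)]; simp
      simp only [List.map_cons, List.foldl_cons, Option.bind_some, h1, Option.map_some, he]
      have hres := ih ds' (List.Pairwise.of_cons hs)
        (fun e hee => by
          have : t'.length > e := (List.pairwise_cons.1 hs).1 e hee
          omega)
        (fun i hi => by
          have hgi : (t' ++ [a]).getD i "" = t'.getD i "" := by
            simp [List.getD, List.getElem?_append_left hi]
          have := hiff i (by simp; omega)
          rw [hgi] at this
          rw [this]
          constructor
          · intro h; rcases List.mem_cons.1 h with h | h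
            · omega
            · exact h
          · intro h; exact List.mem_cons_of_mem _ h)
      rw [hres]
      simp [List.filter_append, ha]
    · have hnm : t'.length ∉ ds := fun h => ha (by
        have := (hiff t'.length (by simp)).2 h
        rw [hget] at this; exact this)
      have hb' : ∀ d ∈ ds, d < t'.length := by
        intro d hd
        have h1 : d < (t' ++ [a]).length := hb d hd
        simp at h1
        have : d ≠ t'.length := fun h => hnm (h ▸ hd)
        omega
      rw [pop_fold_append_last ds t' a hs hb']
      rw [ih ds hs hb' (fun i hi => by
        have hgi : (t' ++ [a]).getD i "" = t'.getD i "" := by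
          simp [List.getD, List.getElem?_append_left hi]
        have := hiff i (by simp; omega)
        rw [hgi] at this; exact this)]
      have hfa : (t' ++ [a]).filter (fun s => s != "") = t'.filter (fun s => s != "") ++ [a] := by
        simp [List.filter_append, ha]
      rw [hfa]
      simp

theorem pvE_pairwise (table : List String) : (pvE table).Pairwise (· < ·) :=
  List.Pairwise.sublist List.filter_sublist List.pairwise_lt_range

theorem mem_pvE (table : List String) (i : Nat) :
    i ∈ pvE table ↔ i < table.length ∧ table.getD i "" = "" := by
  unfold pvE
  simp [List.mem_filter, List.mem_range]

theorem main_eq (table : List String) (hnd : ¬ D_pop_empty_fields table) :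
    pop_empty_fields table = pop_empty_fields_alt table := by
  unfold D_pop_empty_fields at hnd
  push Not at hnd
  obtain ⟨hlen2, hnolow⟩ := hnd
  unfold pop_empty_fields pop_empty_fields_alt
  rw [aloop_eq table table.length]
  -- the pop order is phase1 descending followed by phase2
  have hpop : (if table.length % 2 = 0
      then (pvPopL table table.length).reverse ++ pvPopR table table.length
      else (pvPopR table table.length).reverse ++ pvPopL table table.length) =
      (((pvPhase1 table).reverse ++ pvPhase2 table).map (fun d => Int.ofNat d)) := by
    rw [pvPopL_eq, pvPopR_eq]
    unfold pvPhase1 pvPhase2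
    by_cases hn : table.length % 2 = 0
    · have e1 : (fun j : Nat => if table.length % 2 = 0 then j % 2 == 1 else j % 2 == 0)
          = (fun j : Nat => j % 2 == 1) := by funext j; simp [hn]
      have e2 : (fun j : Nat => if table.length % 2 = 0 then j % 2 == 0 else j % 2 == 1)
          = (fun j : Nat => j % 2 == 0) := by funext j; simp [hn]
      rw [if_pos hn, e1, e2, List.map_append, List.map_reverse]
    · have e1 : (fun j : Nat => if table.length % 2 = 0 then j % 2 == 1 else j % 2 == 0)
          = (fun j : Nat => j % 2 == 0) := by funext j; simp [hn]
      have e2 : (fun j : Nat => if table.length % 2 = 0 then j % 2 == 0 else j % 2 == 1)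
          = (fun j : Nat => j % 2 == 1) := by funext j; simp [hn]
      rw [if_neg hn, e1, e2, List.map_append, List.map_reverse]
  rw [hpop]
  set ds : List Nat := (pvPhase1 table).reverse ++ pvPhase2 table with hds
  -- parity separation of the two phases
  have hparity : ∀ p ∈ pvPhase1 table, ∀ s ∈ pvPhase2 table, p ≠ s := by
    intro p hp s hs hps
    unfold pvPhase1 at hp; unfold pvPhase2 at hs
    have h1 := (List.mem_filter.1 hp).2
    have h2 := (List.mem_filter.1 hs).2
    by_cases hn : table.length % 2 = 0 <;> simp [hn] at h1 h2 <;> omega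
  -- ds is strictly descending
  have hsorted : ds.Pairwise (· > ·) := by
    rw [hds, List.pairwise_append]
    refine ⟨?_, ?_, ?_⟩
    · rw [List.pairwise_reverse]
      exact List.Pairwise.sublist List.filter_sublist (pvE_pairwise table)
    · match hP2 : pvPhase2 table with
      | [] => simp
      | [s] => simp
      | s :: s' :: rest => rw [hP2] at hlen2; simp at hlen2
    · intro p hp s hs
      rw [List.mem_reverse] at hp
      have h1 := hnolow s hs p hp
      have h2 := hparity p hp s hs
      omega
  -- bounds
  have hbound : ∀ d ∈ ds, d < table.length := by
    intro d hd
    rw [hds, List.mem_append, List.mem_reverse] at hd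
    rcases hd with hd | hd
    · exact ((mem_pvE table d).1 (List.mem_of_mem_filter hd)).1
    · exact ((mem_pvE table d).1 (List.mem_of_mem_filter hd)).1
  -- membership in ds ⟺ empty field
  have hiff : ∀ i, i < table.length → ((table.getD i "" = "") ↔ i ∈ ds) := by
    intro i hi
    rw [hds, List.mem_append, List.mem_reverse]
    constructor
    · intro he
      have hE : i ∈ pvE table := (mem_pvE table i).2 ⟨hi, he⟩
      unfold pvPhase1 pvPhase2
      by_cases hn : table.length % 2 = 0 <;> by_cases hp : i % 2 = 0
      · right; rw [List.mem_filter]; exact ⟨hE, by simp [hn, hp]⟩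
      · left; rw [List.mem_filter]; exact ⟨hE, by simp [hn]; omega⟩
      · left; rw [List.mem_filter]; exact ⟨hE, by simp [hn, hp]⟩
      · right; rw [List.mem_filter]; exact ⟨hE, by simp [hn]; omega⟩
    · intro hd
      rcases hd with hd | hd
      · exact ((mem_pvE table i).1 (List.mem_of_mem_filter hd)).2
      · exact ((mem_pvE table i).1 (List.mem_of_mem_filter hd)).2
  have hres := pop_fold_desc_filter table ds hsorted hbound hiff
  rcases hds' : ds with _ | ⟨j, rest⟩
  · -- no empty field: A returns the table, which the filter keeps whole
    have hf : table.filter (fun s => s != "") = table := by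
      apply List.filter_eq_self.2
      intro x hx
      rcases List.mem_iff_getElem.1 hx with ⟨i, hi, rfl⟩
      by_contra hne
      have hxe : table.getD i "" = "" := by
        simp [List.getD, List.getElem?_eq_getElem hi]
        simpa using hne
      have := (hiff i hi).1 hxe
      rw [hds'] at this; simp at this
    simp [hf]
  · rw [hds'] at hres
    simp only [hres]
    simp

-- ===== VERDICT =====
theorem pop_empty_fields_spec : Claim_unchanged_pop_empty_fields := by
  intro table _ _
  unfold Spec_pop_empty_fields
  exact fun hnd => main_eq table hnd

theorem pop_empty_fields_changed : Claim_changed_pop_empty_fields := by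
  unfold Claim_changed_pop_empty_fields; decide
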